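-- pv_equiv track=rewrite | github.com/fraven01/NOESIS-2 | ai_core/rag/guardrails.py | _mime_matches_whitelist
-- ===== SOURCE A (Python) =====
-- from typing import Any, FrozenSet, Optional, Tuple
--
-- def _mime_matches_whitelist(content_type: str, whitelist: Tuple[str, ...]) -> bool:
--     for entry in whitelist:
--         if not entry:
--             continue
--         if entry.endswith("/*"):
--             prefix = entry[:-1]
--             if content_type.startswith(prefix):
--                 return True
--         elif content_type == entry:
--             return True
--     return False
-- ===== SOURCE B (Python) =====
-- def _mime_matches_whitelist(content_type, whitelist):
--     exact = set()
--     prefixes = []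
--     for entry in whitelist:
--         if not entry:
--             continue
--         if entry.endswith("/*"):
--             prefixes.append(entry[:-1])
--         else:
--             exact.add(entry)
--     return content_type in exact or any(content_type.startswith(p) for p in prefixes)
-- ===== Notes on version B (the rewrite author's own statement) =====
-- stated objective: alternative
-- what changed: Instead of one interleaved scan with early returns, B first indexes the whitelist into an exact-match set plus a list of wildcard prefixes, then answers with a set-membership test followed by a prefix pass over only the wildcard entries.
import Mathlib
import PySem

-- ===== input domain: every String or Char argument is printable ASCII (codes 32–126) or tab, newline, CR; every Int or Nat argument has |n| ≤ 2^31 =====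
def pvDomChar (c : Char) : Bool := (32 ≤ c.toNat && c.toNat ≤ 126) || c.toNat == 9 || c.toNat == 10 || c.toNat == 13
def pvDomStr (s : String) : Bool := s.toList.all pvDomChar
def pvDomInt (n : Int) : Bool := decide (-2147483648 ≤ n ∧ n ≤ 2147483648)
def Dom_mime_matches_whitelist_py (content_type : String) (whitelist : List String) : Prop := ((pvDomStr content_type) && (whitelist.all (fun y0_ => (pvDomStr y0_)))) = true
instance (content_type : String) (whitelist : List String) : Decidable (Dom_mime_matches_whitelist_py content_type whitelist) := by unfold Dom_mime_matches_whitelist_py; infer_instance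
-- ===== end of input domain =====

-- B replaces A's single interleaved scan with an index-building pass (exact-match set + wildcard-prefix list) followed by a membership test and a prefix pass; same results, no speed claim.

-- ===== PORT A =====
def mime_matches_whitelist_py (content_type : String) : List String → Bool
  | [] => false
  | entry :: rest =>
    if entry = "" then mime_matches_whitelist_py content_type rest
    else if PySem.Str.endswith entry "/*" then
      if PySem.Str.startswith content_type (PySem.Str.slice entry none (some (-1))) then true
      else mime_matches_whitelist_py content_type rest
    else if content_type = entry then true
    else mime_matches_whitelist_py content_type rest

-- ===== PORT B =====
def pvIndexStep (acc : PySem.Set String × List String) (entry : String) : PySem.Set String × List String :=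
  if entry = "" then acc
  else if PySem.Str.endswith entry "/*" then
    (acc.1, acc.2 ++ [PySem.Str.slice entry none (some (-1))])
  else (PySem.Set.add acc.1 entry, acc.2)

def mime_matches_whitelist_py_alt (content_type : String) (whitelist : List String) : Bool :=
  let st := whitelist.foldl pvIndexStep (PySem.Set.empty, [])
  PySem.Set.contains st.1 content_type || st.2.any (fun p => PySem.Str.startswith content_type p)

-- ===== PRECONDITION & SPEC =====
def Spec_mime_matches_whitelist_py (content_type : String) (whitelist : List String) (out : Bool) : Prop := out = mime_matches_whitelist_py_alt content_type whitelist
instance (content_type : String) (whitelist : List String) (out : Bool) : Decidable (Spec_mime_matches_whitelist_py content_type whitelist out) := by unfold Spec_mime_matches_whitelist_py; infer_instance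

-- ===== CLAIM (what is proved, stated in full; the proofs are below) =====
def Claim_equal_mime_matches_whitelist_py : Prop := ∀ (content_type : String) (whitelist : List String), Dom_mime_matches_whitelist_py content_type whitelist → Spec_mime_matches_whitelist_py content_type whitelist (mime_matches_whitelist_py content_type whitelist)

-- ===== LEMMAS AND PROOFS =====

lemma fold_check (ct : String) (l : List String) :
    ∀ acc : PySem.Set String × List String,
      (let st := l.foldl pvIndexStep acc
       PySem.Set.contains st.1 ct || st.2.any (fun p => PySem.Str.startswith ct p))
      = (PySem.Set.contains acc.1 ct || acc.2.any (fun p => PySem.Str.startswith ct p)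
         || mime_matches_whitelist_py ct l) := by
  induction l with
  | nil => intro acc; simp [mime_matches_whitelist_py]
  | cons entry rest ih =>
    intro acc
    simp only [List.foldl_cons, mime_matches_whitelist_py]
    by_cases h0 : entry = ""
    · simp only [pvIndexStep, h0, if_true]
      exact ih acc
    · by_cases hw : PySem.Str.endswith entry "/*"
      · simp only [pvIndexStep, h0, hw, if_false, if_true, ih]
        by_cases hs : PySem.Str.startswith ct (PySem.Str.slice entry none (some (-1))) = true
        · have hs' : PySem.Chars.startswith ct.toList
              (PySem.List.slice entry.toList none (some (-1))) = true := by simpa using hs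
          simp only [hs, if_true]
          simp [List.any_append, hs']
        · have hs' : PySem.Chars.startswith ct.toList
              (PySem.List.slice entry.toList none (some (-1))) = false := by simpa using hs
          simp only [hs]
          simp [List.any_append, hs']
      · simp only [pvIndexStep, h0, hw, if_false, ih]
        by_cases he : ct = entry
        · simp [he]
        · simp only [he, if_false]
          simp [he]

-- ===== VERDICT (by name: the statement is the Claim_ definition above) =====
theorem mime_matches_whitelist_py_spec : Claim_equal_mime_matches_whitelist_py := by
  intro ct wl _
  unfold Spec_mime_matches_whitelist_py mime_matches_whitelist_py_alt
  have h := fold_check ct wl (PySem.Set.empty, [])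
  simp only [PySem.Set.empty] at h
  simp at h
  simp [h]
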